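-- pv_equiv track=rewrite | github.com/KushnirDmytro/AI_HW4 | CSP_scedule.py | no_more_then_4hrs_study_in_a_row
-- ===== SOURCE A (Python) =====
-- def no_more_then_4hrs_study_in_a_row(partial_assignment, coef):  # TODO make factor for weekends
--     single_study_session_time = 0
--     previous_time_slot = (0, 0)  # init value
--     overtime = 0
--     for t_s in partial_assignment:
--         this_time_slot = partial_assignment[t_s]
--
--         # checking for natural breaks in timeline
--         if t_s[1] != previous_time_slot[1] + 1 or t_s[0] != previous_time_slot[0]:
--             single_study_session_time = 0
--
--         if this_time_slot in ['AI', 'WEB', 'Optional']: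
--             single_study_session_time += 1
--         else:
--             single_study_session_time = 0
--         if (single_study_session_time > 4):
--             overtime += 1
--         previous_time_slot = t_s  # memorising after processing
--     return - overtime * coef
-- ===== SOURCE B (Python) =====
-- def no_more_then_4hrs_study_in_a_row(partial_assignment, coef):
--     # Sliding-window formulation: the original per-slot counter exceeds 4 exactly
--     # when the 5-slot window ending at that slot is an unbroken chain of study
--     # hours, so count such windows directly (no counter, no sentinel needed).
--     items = list(partial_assignment.items())
--     study = ('AI', 'WEB', 'Optional')
--     overtime = 0
--     for (a, sa), (b, sb), (c, sc), (d, sd), (e, se) in zip(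
--             items, items[1:], items[2:], items[3:], items[4:]):
--         if (sa in study
--                 and sb in study and b[1] == a[1] + 1 and b[0] == a[0]
--                 and sc in study and c[1] == b[1] + 1 and c[0] == b[0]
--                 and sd in study and d[1] == c[1] + 1 and d[0] == c[0]
--                 and se in study and e[1] == d[1] + 1 and e[0] == d[0]):
--             overtime += 1
--     return -overtime * coef
-- ===== Notes on version B (the rewrite author's own statement) =====
-- stated objective: alternative
-- what changed: Replaced A's stateful per-slot counter (with the (0,0) sentinel and reset logic) by a stateless sliding-window count: zip the timeline with its four shifts and count the 5-slot windows that form an unbroken chain of study hours, since the counter exceeds 4 exactly once per such window.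
import Mathlib
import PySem

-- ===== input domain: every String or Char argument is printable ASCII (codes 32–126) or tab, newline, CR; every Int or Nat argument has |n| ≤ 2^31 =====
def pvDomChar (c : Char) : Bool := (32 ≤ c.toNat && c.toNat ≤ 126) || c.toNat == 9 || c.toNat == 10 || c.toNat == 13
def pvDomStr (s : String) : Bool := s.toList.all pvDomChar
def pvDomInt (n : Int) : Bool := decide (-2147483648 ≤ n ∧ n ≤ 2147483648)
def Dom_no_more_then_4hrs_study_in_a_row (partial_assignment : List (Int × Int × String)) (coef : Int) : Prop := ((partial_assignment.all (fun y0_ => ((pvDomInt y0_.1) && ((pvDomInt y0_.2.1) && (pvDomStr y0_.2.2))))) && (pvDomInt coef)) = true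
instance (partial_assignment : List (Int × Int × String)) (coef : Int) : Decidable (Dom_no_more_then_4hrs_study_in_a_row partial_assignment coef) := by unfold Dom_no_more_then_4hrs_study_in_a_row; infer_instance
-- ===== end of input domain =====

-- B replaces A's stateful counter-with-sentinel loop by a stateless sliding-window
-- count of 5-slot unbroken study chains (objective: alternative, same cost).

-- ===== PORT A =====
-- state: (single_study_session_time, previous_time_slot, overtime)
def pvStepA (st : Int × (Int × Int) × Int) (t : Int × Int × String) : Int × (Int × Int) × Int :=
  let sst0 := st.1
  let prev := st.2.1
  let ot := st.2.2
  let t_s : Int × Int := (t.1, t.2.1)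
  let this_time_slot := t.2.2
  let sst1 := if t_s.2 ≠ prev.2 + 1 ∨ t_s.1 ≠ prev.1 then 0 else sst0
  let sst2 := if this_time_slot ∈ ["AI", "WEB", "Optional"] then sst1 + 1 else 0
  let ot' := if sst2 > 4 then ot + 1 else ot
  (sst2, t_s, ot')

def no_more_then_4hrs_study_in_a_row (partial_assignment : List (Int × Int × String)) (coef : Int) : Int :=
  let st := partial_assignment.foldl pvStepA (0, (0, 0), 0);
  (- st.2.2) * coef

-- ===== PORT B =====
-- zip(items, items[1:], items[2:], items[3:], items[4:]) as nested List.zip of PySem slices;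
-- a window is ((((w0, w1), w2), w3), w4)
def pvWindows5 (items : List (Int × Int × String)) :
    List (((((Int × Int × String) × (Int × Int × String)) × (Int × Int × String)) × (Int × Int × String)) × (Int × Int × String)) :=
  (((items.zip (PySem.List.slice items (some 1) none)).zip
      (PySem.List.slice items (some 2) none)).zip
      (PySem.List.slice items (some 3) none)).zip
      (PySem.List.slice items (some 4) none)

-- the if-condition of Source B's loop body, the same flat 'and' chain
def pvChainWin (w : ((((Int × Int × String) × (Int × Int × String)) × (Int × Int × String)) × (Int × Int × String)) × (Int × Int × String)) : Bool :=
  let a := w.1.1.1.1; let b := w.1.1.1.2; let c := w.1.1.2; let d := w.1.2; let e := w.2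
  decide (a.2.2 ∈ ["AI", "WEB", "Optional"]) &&
  decide (b.2.2 ∈ ["AI", "WEB", "Optional"]) && (b.2.1 == a.2.1 + 1) && (b.1 == a.1) &&
  decide (c.2.2 ∈ ["AI", "WEB", "Optional"]) && (c.2.1 == b.2.1 + 1) && (c.1 == b.1) &&
  decide (d.2.2 ∈ ["AI", "WEB", "Optional"]) && (d.2.1 == c.2.1 + 1) && (d.1 == c.1) &&
  decide (e.2.2 ∈ ["AI", "WEB", "Optional"]) && (e.2.1 == d.2.1 + 1) && (e.1 == d.1)

def no_more_then_4hrs_study_in_a_row_alt (partial_assignment : List (Int × Int × String)) (coef : Int) : Int :=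
  let items := partial_assignment
  let overtime : Int := (pvWindows5 items).foldl (fun acc w => if pvChainWin w then acc + 1 else acc) 0;
  (- overtime) * coef

-- ===== PRECONDITION & SPEC =====
def Spec_no_more_then_4hrs_study_in_a_row (partial_assignment : List (Int × Int × String)) (coef : Int) (out : Int) : Prop := out = no_more_then_4hrs_study_in_a_row_alt partial_assignment coef
instance (partial_assignment : List (Int × Int × String)) (coef : Int) (out : Int) : Decidable (Spec_no_more_then_4hrs_study_in_a_row partial_assignment coef out) := by unfold Spec_no_more_then_4hrs_study_in_a_row; infer_instance

-- ===== CLAIM (what is proved, stated in full; the proofs are below) =====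
def Claim_equal_no_more_then_4hrs_study_in_a_row : Prop := ∀ (partial_assignment : List (Int × Int × String)) (coef : Int), Dom_no_more_then_4hrs_study_in_a_row partial_assignment coef → Spec_no_more_then_4hrs_study_in_a_row partial_assignment coef (no_more_then_4hrs_study_in_a_row partial_assignment coef)

-- ===== LEMMAS AND PROOFS =====

def pvOk (t : Int × Int × String) : Bool := decide (t.2.2 ∈ ["AI", "WEB", "Optional"])
def pvTs (t : Int × Int × String) : Int × Int := (t.1, t.2.1)
def pvLinked (p : Int × Int) (t : Int × Int × String) : Bool := (t.2.1 == p.2 + 1) && (t.1 == p.1)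

-- A's overtime accumulation, re-expressed as a recursion over the list
def pvOv (s : Int) (prev : Int × Int) : List (Int × Int × String) → Int
  | [] => 0
  | x :: xs =>
    let s' := if pvOk x then (if pvLinked prev x then s + 1 else 1) else 0
    (if s' > 4 then 1 else 0) + pvOv s' (pvTs x) xs

-- "the first k elements are study hours chained to prev"
def pvPc (prev : Int × Int) : List (Int × Int × String) → Nat → Bool
  | _, 0 => true
  | [], _ + 1 => false
  | x :: xs, k + 1 => pvOk x && pvLinked prev x && pvPc (pvTs x) xs k

-- number of 5-windows that are unbroken study chains
def pvCnt5 : List (Int × Int × String) → Int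
  | [] => 0
  | x :: xs => (if pvOk x && pvPc (pvTs x) xs 4 then 1 else 0) + pvCnt5 xs

theorem pvCnt5_cons (x : Int × Int × String) (xs : List (Int × Int × String)) :
    pvCnt5 (x :: xs) = (if (pvOk x && pvPc (pvTs x) xs 4) = true then 1 else 0) + pvCnt5 xs := rfl

theorem pv_foldA_ov (xs : List (Int × Int × String)) :
    ∀ (s : Int) (prev : Int × Int) (ot : Int),
      (xs.foldl pvStepA (s, prev, ot)).2.2 = ot + pvOv s prev xs := by
  induction xs with
  | nil => intro s prev ot; simp [pvOv]
  | cons x xs ih =>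
    intro s prev ot
    simp only [List.foldl_cons, pvOv]
    rw [ih]
    have hstep : pvStepA (s, prev, ot) x =
        (if pvOk x then (if pvLinked prev x then s + 1 else 1) else 0, pvTs x,
         ot + (if (if pvOk x then (if pvLinked prev x then s + 1 else 1) else 0) > 4 then 1 else 0)) := by
      simp only [pvStepA, pvOk, pvLinked, pvTs]
      by_cases hok : x.2.2 ∈ ["AI", "WEB", "Optional"] <;>
        by_cases h1 : x.2.1 = prev.2 + 1 <;> by_cases h2 : x.1 = prev.1 <;>
          simp [hok, h1, h2] <;> split <;> simp <;> omega
    rw [hstep]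
    ring

-- the sliding-window invariant: overtime from state (s, prev) equals the number of
-- full 5-windows plus the windows that straddle the already-processed prefix
theorem pv_ov_cnt (xs : List (Int × Int × String)) :
    ∀ (s : Int) (prev : Int × Int), 0 ≤ s →
      pvOv s prev xs = pvCnt5 xs
        + (if pvPc prev xs 1 ∧ s ≥ 4 then 1 else 0)
        + (if pvPc prev xs 2 ∧ s ≥ 3 then 1 else 0)
        + (if pvPc prev xs 3 ∧ s ≥ 2 then 1 else 0)
        + (if pvPc prev xs 4 ∧ s ≥ 1 then 1 else 0) := by
  induction xs with
  | nil =>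
    intro s prev hs
    have r1 : pvPc prev [] 1 = false := rfl
    have r2 : pvPc prev [] 2 = false := rfl
    have r3 : pvPc prev [] 3 = false := rfl
    have r4 : pvPc prev [] 4 = false := rfl
    simp [pvOv, pvCnt5, r1, r2, r3, r4]
  | cons x xs ih =>
    intro s prev hs
    have q1 : pvPc prev (x :: xs) 1 = (pvOk x && pvLinked prev x && pvPc (pvTs x) xs 0) := rfl
    have q2 : pvPc prev (x :: xs) 2 = (pvOk x && pvLinked prev x && pvPc (pvTs x) xs 1) := rfl
    have q3 : pvPc prev (x :: xs) 3 = (pvOk x && pvLinked prev x && pvPc (pvTs x) xs 2) := rfl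
    have q4 : pvPc prev (x :: xs) 4 = (pvOk x && pvLinked prev x && pvPc (pvTs x) xs 3) := rfl
    have q0 : pvPc (pvTs x) xs 0 = true := by cases xs <;> rfl
    rcases Bool.dichotomy (pvOk x) with hok | hok
    · -- non-study hour: counter resets to 0
      have step : pvOv s prev (x :: xs) = pvOv 0 (pvTs x) xs := by
        simp [pvOv, hok]
      rw [step, ih 0 (pvTs x) le_rfl, pvCnt5_cons]
      rcases Bool.dichotomy (pvPc (pvTs x) xs 1) with p1 | p1 <;>
      rcases Bool.dichotomy (pvPc (pvTs x) xs 2) with p2 | p2 <;>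
      rcases Bool.dichotomy (pvPc (pvTs x) xs 3) with p3 | p3 <;>
      rcases Bool.dichotomy (pvPc (pvTs x) xs 4) with p4 | p4 <;>
        simp only [q1, q2, q3, q4, q0, p1, p2, p3, p4, hok, Bool.true_and, Bool.false_and,
          Bool.and_true, Bool.and_false, Bool.false_eq_true, false_and, true_and,
          eq_self_iff_true, if_false, if_true] <;>
        first | omega | (split_ifs <;> omega)
    · rcases Bool.dichotomy (pvLinked prev x) with hl | hl
      · -- study hour after a break: counter restarts at 1
        have step : pvOv s prev (x :: xs) = pvOv 1 (pvTs x) xs := by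
          simp [pvOv, hok, hl]
        rw [step, ih 1 (pvTs x) (by omega), pvCnt5_cons]
        rcases Bool.dichotomy (pvPc (pvTs x) xs 1) with p1 | p1 <;>
        rcases Bool.dichotomy (pvPc (pvTs x) xs 2) with p2 | p2 <;>
        rcases Bool.dichotomy (pvPc (pvTs x) xs 3) with p3 | p3 <;>
        rcases Bool.dichotomy (pvPc (pvTs x) xs 4) with p4 | p4 <;>
          simp only [q1, q2, q3, q4, q0, p1, p2, p3, p4, hok, hl, Bool.true_and, Bool.false_and,
            Bool.and_true, Bool.and_false, Bool.false_eq_true, false_and, true_and,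
            eq_self_iff_true, if_false, if_true] <;>
          first | omega | (split_ifs <;> omega)
      · -- chained study hour: counter grows to s + 1
        have step : pvOv s prev (x :: xs) =
            (if s + 1 > 4 then 1 else 0) + pvOv (s + 1) (pvTs x) xs := by
          simp [pvOv, hok, hl]
        rw [step, ih (s + 1) (pvTs x) (by omega), pvCnt5_cons]
        rcases Bool.dichotomy (pvPc (pvTs x) xs 1) with p1 | p1 <;>
        rcases Bool.dichotomy (pvPc (pvTs x) xs 2) with p2 | p2 <;>
        rcases Bool.dichotomy (pvPc (pvTs x) xs 3) with p3 | p3 <;>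
        rcases Bool.dichotomy (pvPc (pvTs x) xs 4) with p4 | p4 <;>
          simp only [q1, q2, q3, q4, q0, p1, p2, p3, p4, hok, hl, Bool.true_and, Bool.false_and,
            Bool.and_true, Bool.and_false, Bool.false_eq_true, false_and, true_and,
            eq_self_iff_true, if_false, if_true] <;>
          first | omega | (split_ifs <;> omega)

-- B's nested-zip window list, peeled one element at a time
theorem pv_windows5_cons (x : Int × Int × String) (xs : List (Int × Int × String)) :
    pvWindows5 (x :: xs) =
      (match xs with
       | y1 :: y2 :: y3 :: y4 :: _ => [((((x, y1), y2), y3), y4)]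
       | _ => []) ++ pvWindows5 xs := by
  have hs1 : ∀ (l : List (Int × Int × String)), PySem.List.slice l (some 1) none = l.drop 1 := by
    intro l; simpa using PySem.List.slice_from_natCast l 1
  have hs2 : ∀ (l : List (Int × Int × String)), PySem.List.slice l (some 2) none = l.drop 2 := by
    intro l; simpa using PySem.List.slice_from_natCast l 2
  have hs3 : ∀ (l : List (Int × Int × String)), PySem.List.slice l (some 3) none = l.drop 3 := by
    intro l; simpa using PySem.List.slice_from_natCast l 3
  have hs4 : ∀ (l : List (Int × Int × String)), PySem.List.slice l (some 4) none = l.drop 4 := by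
    intro l; simpa using PySem.List.slice_from_natCast l 4
  match xs with
  | [] => simp [pvWindows5, hs1, hs2, hs3, hs4]
  | [y1] => simp [pvWindows5, hs1, hs2, hs3, hs4]
  | [y1, y2] => simp [pvWindows5, hs1, hs2, hs3, hs4]
  | [y1, y2, y3] => simp [pvWindows5, hs1, hs2, hs3, hs4]
  | y1 :: y2 :: y3 :: y4 :: t =>
    simp [pvWindows5, hs1, hs2, hs3, hs4, List.zip_cons_cons]

-- counting chain windows in the zip equals the recursive count pvCnt5
theorem pv_countB_cnt5 (xs : List (Int × Int × String)) :
    ((pvWindows5 xs).countP pvChainWin : Int) = pvCnt5 xs := by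
  induction xs with
  | nil => simp [pvWindows5, pvCnt5, PySem.List.slice]
  | cons x xs ih =>
    rw [pv_windows5_cons, List.countP_append]
    match xs with
    | [] =>
      have f : pvPc (pvTs x) ([] : List (Int × Int × String)) 4 = false := rfl
      simpa [pvCnt5_cons, f] using ih
    | [y1] =>
      have f : pvPc (pvTs x) [y1] 4 = false := by
        simp [show pvPc (pvTs x) [y1] 4 =
          (pvOk y1 && pvLinked (pvTs x) y1 && pvPc (pvTs y1) ([] : List (Int × Int × String)) 3) from rfl,
          show pvPc (pvTs y1) ([] : List (Int × Int × String)) 3 = false from rfl]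
      simpa [pvCnt5_cons, f] using ih
    | [y1, y2] =>
      have f : pvPc (pvTs x) [y1, y2] 4 = false := by
        simp [show pvPc (pvTs x) [y1, y2] 4 =
          (pvOk y1 && pvLinked (pvTs x) y1 && pvPc (pvTs y1) [y2] 3) from rfl,
          show pvPc (pvTs y1) [y2] 3 =
            (pvOk y2 && pvLinked (pvTs y1) y2 && pvPc (pvTs y2) ([] : List (Int × Int × String)) 2) from rfl,
          show pvPc (pvTs y2) ([] : List (Int × Int × String)) 2 = false from rfl]
      simpa [pvCnt5_cons, f] using ih
    | [y1, y2, y3] =>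
      have f : pvPc (pvTs x) [y1, y2, y3] 4 = false := by
        simp [show pvPc (pvTs x) [y1, y2, y3] 4 =
          (pvOk y1 && pvLinked (pvTs x) y1 && pvPc (pvTs y1) [y2, y3] 3) from rfl,
          show pvPc (pvTs y1) [y2, y3] 3 =
            (pvOk y2 && pvLinked (pvTs y1) y2 && pvPc (pvTs y2) [y3] 2) from rfl,
          show pvPc (pvTs y2) [y3] 2 =
            (pvOk y3 && pvLinked (pvTs y2) y3 && pvPc (pvTs y3) ([] : List (Int × Int × String)) 1) from rfl,
          show pvPc (pvTs y3) ([] : List (Int × Int × String)) 1 = false from rfl]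
      simpa [pvCnt5_cons, f] using ih
    | y1 :: y2 :: y3 :: y4 :: t =>
      have hw : pvChainWin ((((x, y1), y2), y3), y4) =
          (pvOk x && pvPc (pvTs x) (y1 :: y2 :: y3 :: y4 :: t) 4) := by
        simp [pvChainWin, pvOk, pvLinked, pvTs, pvPc, Bool.and_assoc]
      rw [pvCnt5_cons, ← ih]
      simp only [List.countP_cons, List.countP_nil, hw]
      push_cast
      split_ifs <;> omega

-- ===== VERDICT (by name: the statement is the Claim_ definition above) =====
theorem no_more_then_4hrs_study_in_a_row_spec : Claim_equal_no_more_then_4hrs_study_in_a_row := by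
  intro partial_assignment coef _
  have hA : no_more_then_4hrs_study_in_a_row partial_assignment coef
      = (- pvOv 0 (0, 0) partial_assignment) * coef := by
    simp only [no_more_then_4hrs_study_in_a_row]
    rw [pv_foldA_ov]
    ring
  have hcnt : pvOv 0 (0, 0) partial_assignment = pvCnt5 partial_assignment := by
    rw [pv_ov_cnt partial_assignment 0 (0, 0) le_rfl]
    have n1 : ¬(pvPc (0, 0) partial_assignment 1 = true ∧ (0 : ℤ) ≥ 4) := fun h => by
      have := h.2; norm_num at this
    have n2 : ¬(pvPc (0, 0) partial_assignment 2 = true ∧ (0 : ℤ) ≥ 3) := fun h => by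
      have := h.2; norm_num at this
    have n3 : ¬(pvPc (0, 0) partial_assignment 3 = true ∧ (0 : ℤ) ≥ 2) := fun h => by
      have := h.2; norm_num at this
    have n4 : ¬(pvPc (0, 0) partial_assignment 4 = true ∧ (0 : ℤ) ≥ 1) := fun h => by
      have := h.2; norm_num at this
    rw [if_neg n1, if_neg n2, if_neg n3, if_neg n4]
    ring
  have hB : no_more_then_4hrs_study_in_a_row_alt partial_assignment coef
      = (- pvCnt5 partial_assignment) * coef := by
    simp only [no_more_then_4hrs_study_in_a_row_alt]
    rw [PySem.List.foldl_if_add_one, pv_countB_cnt5]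
    ring
  show _ = _
  rw [hA, hB, hcnt]
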